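-- pv_equiv track=rewrite | github.com/EEKIM10/acronym-guesser | main.py | wrap_shift
-- ===== SOURCE A (Python) =====
-- def wrap_shift(_key: int) -> int:
--     """Returns the wrapped shift"""
--     new_key = 0
--     for _ in range(_key):
--         new_key += 1
--         if new_key > 25:
--             new_key = 0
--         elif new_key < 0:
--             new_key = 0
--
--     return new_key
-- ===== SOURCE B (Python) =====
-- def wrap_shift(_key: int) -> int:
--     """Returns the wrapped shift"""
--     return max(_key, 0) % 26
-- ===== Notes on version B (the rewrite author's own statement) =====
-- stated objective: faster
-- what changed: Replaced the O(n) counting loop (increment and reset past 25) by the closed form max(_key, 0) % 26.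
import Mathlib
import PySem

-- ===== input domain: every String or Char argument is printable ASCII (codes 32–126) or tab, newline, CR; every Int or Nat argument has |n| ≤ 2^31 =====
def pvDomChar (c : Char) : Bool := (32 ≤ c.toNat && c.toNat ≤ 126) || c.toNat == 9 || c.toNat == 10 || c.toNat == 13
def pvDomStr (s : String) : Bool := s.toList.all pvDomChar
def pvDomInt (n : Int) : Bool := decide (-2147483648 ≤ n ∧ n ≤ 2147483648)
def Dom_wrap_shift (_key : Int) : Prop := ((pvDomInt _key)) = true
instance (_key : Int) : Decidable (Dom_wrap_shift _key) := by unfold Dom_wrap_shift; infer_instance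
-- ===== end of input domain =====

-- ===== PORT A =====
-- B replaces A's per-step counting loop with the closed form max(_key,0) % 26 (objective: faster).
def wrap_shift (_key : Int) : Int :=
  (PySem.List.pyRange 0 _key 1).foldl
    (fun new_key _ =>
      let new_key := new_key + 1
      if new_key > 25 then 0
      else if new_key < 0 then 0
      else new_key) 0

-- ===== PORT B =====
def wrap_shift_alt (_key : Int) : Int :=
  PySem.Int.mod (max _key 0) 26

-- ===== PRECONDITION & SPEC =====
def Spec_wrap_shift (_key : Int) (out : Int) : Prop := out = wrap_shift_alt _key
instance (_key : Int) (out : Int) : Decidable (Spec_wrap_shift _key out) := by unfold Spec_wrap_shift; infer_instance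

-- ===== CLAIM (what is proved, stated in full; the proofs are below) =====
def Claim_equal_wrap_shift : Prop := ∀ (_key : Int), Dom_wrap_shift _key → Spec_wrap_shift _key (wrap_shift _key)

-- ===== LEMMAS AND PROOFS =====

-- ===== VERDICT (by name: the statement is the Claim_ definition above) =====
theorem loop_invariant (l : List Int) (s : Int) (hs : 0 ≤ s) (hs' : s ≤ 25) :
    l.foldl
      (fun new_key _ =>
        let new_key := new_key + 1
        if new_key > 25 then 0
        else if new_key < 0 then 0
        else new_key) s = (s + l.length) % 26 := by
  induction l generalizing s with
  | nil => simp; omega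
  | cons x xs ih =>
    simp only [List.foldl_cons, List.length_cons]
    by_cases h : s + 1 > 25
    · have h26 : s + 1 = 26 := by omega
      rw [if_pos h, ih 0 (by omega) (by omega)]
      omega
    · rw [if_neg h, if_neg (by omega), ih (s+1) (by omega) (by omega)]
      push_cast; ring_nf

theorem wrap_shift_spec : Claim_equal_wrap_shift := by
  intro k _
  unfold Spec_wrap_shift wrap_shift wrap_shift_alt
  rw [loop_invariant _ 0 le_rfl (by norm_num)]
  rw [PySem.List.length_pyRange_one]
  simp only [PySem.Int.mod]
  rw [Int.fmod_eq_emod]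
  omega
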